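-- pv_equiv track=rewrite | github.com/pypi-data/pypi-mirror-303 | packages/reft/reft-0.3.6.tar.gz/reft-0.3.6/reft/ft.py | _api_count_bracket
-- ===== SOURCE A (Python) =====
-- def _api_count_bracket(txt: str) -> int:
--     """
--     Count the number of brackets without '\'
--     * Ignore ?=, ?!, ?<=, ?<! and (
--     :param txt:
--     :return:
--     """
--     count = 0
--     for i in range(len(txt)):
--         if txt[i] == '(' and (i == 0 or txt[i - 1] != '\\'):
--             # 排除正向前瞻和负向前瞻
--             if i >= 3 and txt[i-3:i] in ['?<!', '?<=']:
--                 continue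
--             if i >= 2 and txt[i-2:i] in ['?!', '?=']:
--                 continue
--             count += 1
--     return count
-- ===== SOURCE B (Python) =====
-- def _api_count_bracket(txt: str) -> int:
--     """Split the text on '(' and count the separators whose preceding segment
--     does not end with the escape or a lookaround marker.  A pattern never
--     contains '(' itself, so checking the segment is exactly checking the text
--     before each '('."""
--     count = 0
--     for part in txt.split('(')[:-1]:
--         if not part.endswith(('\\', '?!', '?=', '?<!', '?<=')):
--             count += 1
--     return count
-- ===== Notes on version B (the rewrite author's own statement) =====
-- stated objective: faster
-- what changed: A scans indices in Python and re-slices the string around each position; B splits the text on '(' once and counts the separators whose preceding segment does not end with the escape/lookaround markers (patterns contain no '(', so the segment check equals A's window check).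
import Mathlib
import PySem

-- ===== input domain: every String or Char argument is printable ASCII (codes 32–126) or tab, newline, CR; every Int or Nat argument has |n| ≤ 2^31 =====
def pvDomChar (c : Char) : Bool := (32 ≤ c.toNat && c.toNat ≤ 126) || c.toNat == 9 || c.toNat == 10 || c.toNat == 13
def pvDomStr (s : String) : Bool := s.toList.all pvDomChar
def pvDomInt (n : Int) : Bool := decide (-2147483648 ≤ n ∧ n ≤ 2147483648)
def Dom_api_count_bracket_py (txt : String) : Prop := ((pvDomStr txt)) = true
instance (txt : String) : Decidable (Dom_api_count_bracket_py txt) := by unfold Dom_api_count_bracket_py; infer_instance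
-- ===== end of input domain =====

-- B replaces A's index loop over the string by a staged algorithm: split the text
-- on '(' once, then count the separators whose preceding segment does not end with
-- the escape or a lookaround marker (objective: alternative).

-- ===== PORT A =====
-- A's loop body: 'continue' becomes nested if-expressions in the same order.
def pvStepA (s : List Char) (count : Int) (i : Int) : Int :=
  if PySem.List.pyGetD s i ' ' = '(' ∧ (i = 0 ∨ ¬ PySem.List.pyGetD s (i - 1) ' ' = '\\') then
    if 3 ≤ i ∧ (PySem.List.slice s (some (i - 3)) (some i) = ['?', '<', '!'] ∨
                PySem.List.slice s (some (i - 3)) (some i) = ['?', '<', '=']) then count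
    else if 2 ≤ i ∧ (PySem.List.slice s (some (i - 2)) (some i) = ['?', '!'] ∨
                     PySem.List.slice s (some (i - 2)) (some i) = ['?', '=']) then count
    else count + 1
  else count

def api_count_bracket_py (txt : String) : Int :=
  (PySem.List.pyRange 0 (txt.toList.length : Int) 1).foldl (pvStepA txt.toList) 0

-- ===== PORT B =====
-- Source B's 'part.endswith(('\\', '?!', '?=', '?<!', '?<='))'
def pvBad (p : List Char) : Bool :=
  PySem.Chars.endswith p ['\\'] || PySem.Chars.endswith p ['?', '!'] ||
  PySem.Chars.endswith p ['?', '='] || PySem.Chars.endswith p ['?', '<', '!'] ||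
  PySem.Chars.endswith p ['?', '<', '=']

-- Source B: count over txt.split('(')[:-1]
def api_count_bracket_py_alt (txt : String) : Int :=
  (PySem.List.slice (PySem.Chars.splitOn txt.toList ['(']) none (some (-1))).foldl
    (fun c p => if pvBad p then c else c + 1) 0

-- ===== PRECONDITION & SPEC =====
def Spec_api_count_bracket_py (txt : String) (out : Int) : Prop := out = api_count_bracket_py_alt txt
instance (txt : String) (out : Int) : Decidable (Spec_api_count_bracket_py txt out) := by unfold Spec_api_count_bracket_py; infer_instance

-- ===== CLAIM (what is proved, stated in full; the proofs are below) =====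
def Claim_equal_api_count_bracket_py : Prop := ∀ (txt : String), Dom_api_count_bracket_py txt → Spec_api_count_bracket_py txt (api_count_bracket_py txt)

-- ===== LEMMAS AND PROOFS =====

-- An intermediate single-pass form used only in the proof: a left fold keeping
-- (count, window of the last ≤ 3 characters seen).
def pvStepB (st : Int × List Char) (ch : Char) : Int × List Char :=
  ((if ch = '(' ∧ ¬ (PySem.Chars.endswith st.2 ['\\'] = true ∨
        (PySem.List.slice st.2 (some (-2)) none = ['?', '!'] ∨
         PySem.List.slice st.2 (some (-2)) none = ['?', '=']) ∨
        (st.2 = ['?', '<', '!'] ∨ st.2 = ['?', '<', '=']))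
    then st.1 + 1 else st.1),
   PySem.List.slice (st.2 ++ [ch]) (some (-3)) none)

lemma pv_if_shape (c : Int) (P E A3 B3 A2 B2 : Prop) [Decidable P] [Decidable E]
    [Decidable A3] [Decidable B3] [Decidable A2] [Decidable B2] :
    (if P ∧ ¬ E then (if A3 ∨ B3 then c else if A2 ∨ B2 then c else c + 1) else c)
      = (if P ∧ ¬ (E ∨ (A2 ∨ B2) ∨ (A3 ∨ B3)) then c + 1 else c) := by
  split_ifs <;> tauto

lemma pv_getD_at (u v : List Char) (c : Char) :
    PySem.List.pyGetD (u ++ c :: v) ((u.length : Nat) : Int) ' ' = c := by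
  simp [PySem.List.pyGetD_natCast]

-- the window after processing prefix p is the last ≤3 characters of p
lemma pv_window_step (p : List Char) (ch : Char) :
    PySem.List.slice ((p.drop (p.length - 3)) ++ [ch]) (some (-3)) none
      = (p ++ [ch]).drop ((p ++ [ch]).length - 3) := by
  rw [PySem.List.slice_from_neg_ofNat _ 3 (by omega)]
  rw [List.drop_append_of_le_length (by simp),
      List.drop_append_of_le_length (by simp)]
  rw [List.drop_drop]
  congr 2
  simp
  omega

-- the per-step counters agree: A's condition at index |p| equals the window condition
lemma pv_step_eq (p t : List Char) (c : Int) (ch : Char) :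
    pvStepA (p ++ ch :: t) c (p.length : Int)
      = (pvStepB (c, p.drop (p.length - 3)) ch).1 := by
  have hget : PySem.List.pyGetD (p ++ ch :: t) ((p.length : Nat) : Int) ' ' = ch :=
    pv_getD_at p t ch
  have hwlast : (p.drop (p.length - 3)).getLast? = p.getLast? := by
    by_cases hp : p = []
    · simp [hp]
    · conv_rhs => rw [← List.take_append_drop (p.length - 3) p]
      rw [List.getLast?_append_of_ne_nil]
      intro h
      have := congrArg List.length h
      simp at this
      have : p.length = 0 := by omega
      simp_all
  have h2 : ((p.length : Int) = 0 ∨ ¬ PySem.List.pyGetD (p ++ ch :: t) ((p.length : Int) - 1) ' ' = '\\')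
      ↔ ¬ (PySem.Chars.endswith (p.drop (p.length - 3)) ['\\'] = true) := by
    have hends : PySem.Chars.endswith (p.drop (p.length - 3)) ['\\'] = true
        ↔ p.getLast? = some '\\' := by
      rw [PySem.Chars.endswith_iff]
      constructor
      · rintro ⟨u, hu⟩
        rw [← hwlast, ← hu]
        simp
      · intro h
        rw [← hwlast] at h
        obtain ⟨u, hu⟩ := List.getLast?_eq_some_iff.mp h
        exact ⟨u, by rw [hu]⟩
    rcases Nat.eq_zero_or_pos p.length with h0 | hpos
    · have hp : p = [] := List.eq_nil_of_length_eq_zero h0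
      subst hp
      simp [PySem.Chars.endswith, List.isSuffixOf]
    · have hne : p ≠ [] := by intro h; simp [h] at hpos
      obtain ⟨l, hl⟩ : ∃ l, p.getLast? = some l := by
        cases hgl : p.getLast? with
        | none => exact absurd (List.getLast?_eq_none_iff.mp hgl) hne
        | some l => exact ⟨l, rfl⟩
      have hcast : ((p.length : Int) - 1) = ((p.length - 1 : Nat) : Int) := by push_cast [hpos]; omega
      have hidx : PySem.List.pyGetD (p ++ ch :: t) ((p.length : Int) - 1) ' ' = l := by
        rw [hcast, PySem.List.pyGetD_natCast]
        rw [List.getD_eq_getElem?_getD, List.getElem?_append_left (by omega)]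
        rw [← List.getLast?_eq_getElem?, hl]
        rfl
      rw [hidx, hends, hl]
      constructor
      · rintro (h | h)
        · exfalso; omega
        · intro he; exact h (by injection he)
      · intro h
        right
        intro he
        exact h (by rw [he])
  have h3 : ∀ L : List Char, L.length = 3 →
      ((3 ≤ (p.length : Int) ∧ PySem.List.slice (p ++ ch :: t) (some ((p.length : Int) - 3)) (some (p.length : Int)) = L)
        ↔ p.drop (p.length - 3) = L) := by
    intro L hL
    rcases le_or_gt 3 p.length with hge | hlt
    · have hcast3 : ((p.length : Int) - 3) = ((p.length - 3 : Nat) : Int) := by omega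
      rw [hcast3, PySem.List.slice_natCast]
      rw [List.drop_append_of_le_length (by omega)]
      rw [List.take_left' (by simp)]
      simp [show (3 : Int) ≤ (p.length : Int) by omega]
    · constructor
      · rintro ⟨h, _⟩
        exfalso
        omega
      · intro h
        exfalso
        have := congrArg List.length h
        simp [hL] at this
        omega
  have h4 : ∀ L : List Char, L.length = 2 →
      ((2 ≤ (p.length : Int) ∧ PySem.List.slice (p ++ ch :: t) (some ((p.length : Int) - 2)) (some (p.length : Int)) = L)
        ↔ PySem.List.slice (p.drop (p.length - 3)) (some (-2)) none = L) := by
    intro L hL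
    have hw2 : PySem.List.slice (p.drop (p.length - 3)) (some (-2)) none = p.drop (p.length - 2) := by
      rw [PySem.List.slice_from_neg_ofNat _ 2 (by omega), List.drop_drop]
      congr 1
      simp
      omega
    rw [hw2]
    rcases le_or_gt 2 p.length with hge | hlt
    · have hcast2 : ((p.length : Int) - 2) = ((p.length - 2 : Nat) : Int) := by omega
      rw [hcast2, PySem.List.slice_natCast]
      rw [List.drop_append_of_le_length (by omega)]
      rw [List.take_left' (by simp)]
      simp [show (2 : Int) ≤ (p.length : Int) by omega]
    · constructor
      · rintro ⟨h, _⟩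
        exfalso
        omega
      · intro h
        exfalso
        have := congrArg List.length h
        simp [hL] at this
        omega
  have h3a := h3 ['?', '<', '!'] rfl
  have h3b := h3 ['?', '<', '='] rfl
  have h4a := h4 ['?', '!'] rfl
  have h4b := h4 ['?', '='] rfl
  unfold pvStepA pvStepB
  rw [hget]
  simp only [h2, and_or_left, h3a, h3b, h4a, h4b]
  exact pv_if_shape c _ _ _ _ _ _

lemma pv_loop_eq (t : List Char) : ∀ (p : List Char) (c : Int),
    (PySem.List.pyRange (p.length : Int) ((p.length + t.length : Nat) : Int) 1).foldl
        (pvStepA (p ++ t)) c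
      = (t.foldl pvStepB (c, p.drop (p.length - 3))).1 := by
  induction t with
  | nil =>
    intro p c
    rw [PySem.List.pyRange_one_eq_nil (by simp)]
    simp
  | cons ch t ih =>
    intro p c
    rw [PySem.List.pyRange_one_cons (by simp)]
    have h1 : ((p.length : Int) + 1) = ((p ++ [ch]).length : Nat) := by simp
    have h2 : ((p.length + (ch :: t).length : Nat) : Int)
        = (((p ++ [ch]).length + t.length : Nat) : Int) := by push_cast; simp; omega
    have h3 : p ++ ch :: t = (p ++ [ch]) ++ t := by simp
    rw [List.foldl_cons, h3]
    have hstep := pv_step_eq p t c ch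
    rw [h3] at hstep
    calc (PySem.List.pyRange ((p.length : Int) + 1) ((p.length + (ch :: t).length : Nat) : Int) 1).foldl
            (pvStepA ((p ++ [ch]) ++ t)) (pvStepA ((p ++ [ch]) ++ t) c (p.length : Int))
        = (t.foldl pvStepB ((pvStepA ((p ++ [ch]) ++ t) c (p.length : Int)), (p ++ [ch]).drop ((p ++ [ch]).length - 3))).1 := by
          rw [h1, h2]; exact ih (p ++ [ch]) _
      _ = (t.foldl pvStepB (pvStepB (c, p.drop (p.length - 3)) ch)).1 := by
          have heq : pvStepB (c, p.drop (p.length - 3)) ch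
              = (pvStepA ((p ++ [ch]) ++ t) c (p.length : Int),
                 (p ++ [ch]).drop ((p ++ [ch]).length - 3)) := by
            apply Prod.ext
            · exact hstep.symm
            · exact pv_window_step p ch
          rw [heq]
      _ = ((ch :: t).foldl pvStepB (c, p.drop (p.length - 3))).1 := by rw [List.foldl_cons]

-- ---------- split side ----------

-- reference split on '(' (structural recursion)
def pvSplit : List Char → List (List Char)
  | [] => [[]]
  | c :: r => if c = '(' then [] :: pvSplit r else (pvSplit r).modifyHead (c :: ·)

lemma pvSplit_ne_nil (l : List Char) : pvSplit l ≠ [] := by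
  induction l with
  | nil => simp [pvSplit]
  | cons c r ih =>
    simp only [pvSplit]
    split_ifs
    · simp
    · cases h : pvSplit r with
      | nil => exact absurd h ih
      | cons a t => simp

-- PySem's fuel-based splitOn agrees with pvSplit
lemma pv_go_nil (cur : List Char) (acc : List (List Char)) (f : Nat) :
    PySem.Chars.splitOn.go ['('] (f+1) [] cur acc = (cur.reverse :: acc).reverse := by
  rw [PySem.Chars.splitOn.go]; simp

lemma pv_go_cons (cur : List Char) (acc : List (List Char)) (f : Nat) (c : Char) (rest : List Char) :
    PySem.Chars.splitOn.go ['('] (f+1) (c :: rest) cur acc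
      = if c = '(' then PySem.Chars.splitOn.go ['('] f rest [] (cur.reverse :: acc)
        else PySem.Chars.splitOn.go ['('] f rest (c :: cur) acc := by
  rw [PySem.Chars.splitOn.go]
  by_cases h : c = '('
  · subst h
    simp only [List.isPrefixOf, beq_self_eq_true, Bool.and_self, if_true]
    simp [List.drop]
  · have hp : (['('].isPrefixOf (c :: rest)) = false := by
      simp [List.isPrefixOf]
      exact fun he => absurd he.symm h
    simp [hp, h]

lemma pv_splitOn_go (l : List Char) : ∀ (fuel : Nat) (cur : List Char) (acc : List (List Char)),
    l.length < fuel →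
    PySem.Chars.splitOn.go ['('] fuel l cur acc
      = acc.reverse ++ (pvSplit l).modifyHead (cur.reverse ++ ·) := by
  induction l with
  | nil =>
    intro fuel cur acc h
    obtain ⟨f, rfl⟩ : ∃ f, fuel = f + 1 := ⟨fuel - 1, by omega⟩
    rw [pv_go_nil]
    simp [pvSplit]
  | cons c r ih =>
    intro fuel cur acc h
    obtain ⟨f, rfl⟩ : ∃ f, fuel = f + 1 := ⟨fuel - 1, by omega⟩
    rw [pv_go_cons]
    simp only [List.length_cons] at h
    by_cases hc : c = '('
    · rw [if_pos hc, ih f [] (cur.reverse :: acc) (by omega)]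
      simp [pvSplit, hc]
      cases hs : pvSplit r <;> simp
    · rw [if_neg hc, ih f (c :: cur) acc (by omega)]
      simp only [pvSplit, if_neg hc]
      cases hs : pvSplit r with
      | nil => simp
      | cons a t => simp

lemma pv_splitOn_eq (l : List Char) : PySem.Chars.splitOn l ['('] = pvSplit l := by
  unfold PySem.Chars.splitOn
  rw [pv_splitOn_go l (l.length + 1) [] [] (by omega)]
  cases hs : pvSplit l <;> simp

-- segment counter: pvCnt pre s = number of counted '(' in s, where pre is the
-- current segment accumulated so far (the characters since the last '(')
def pvCnt : List Char → List Char → Int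
  | _, [] => 0
  | pre, c :: r => if c = '(' then (if pvBad pre then 0 else 1) + pvCnt [] r
                   else pvCnt (pre ++ [c]) r

-- B's fold over the split equals pvCnt
lemma pv_split_cnt (s : List Char) : ∀ (pre : List Char) (c : Int),
    (((pvSplit s).modifyHead (pre ++ ·)).dropLast.foldl
        (fun c p => if pvBad p then c else c + 1) c) = c + pvCnt pre s := by
  induction s with
  | nil => intro pre c; simp [pvSplit, pvCnt]
  | cons ch r ih =>
    intro pre c
    by_cases hc : ch = '('
    · simp only [pvSplit, if_pos hc, List.modifyHead_cons]
      rw [List.dropLast_cons_of_ne_nil (pvSplit_ne_nil r), List.foldl_cons]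
      have hid : (pvSplit r).modifyHead (fun x => ([] : List Char) ++ x) = pvSplit r := by
        cases hs : pvSplit r <;> simp
      have := ih [] (if pvBad pre then c else c + 1)
      rw [hid] at this
      simp only [List.append_nil]
      rw [this]
      simp only [pvCnt, if_pos hc]
      split_ifs <;> ring
    · simp only [pvSplit, if_neg hc, List.modifyHead_modifyHead]
      have hcomp : ((fun x => pre ++ x) ∘ (fun x => ch :: x)) = (fun x => (pre ++ [ch]) ++ x) := by
        funext x; simp
      rw [hcomp, ih (pre ++ [ch]) c]
      simp [pvCnt, hc]

-- relation between the sliding window w and the current segment pre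
def pvRel (w pre : List Char) : Prop :=
  (3 ≤ pre.length ∧ w = pre.drop (pre.length - 3)) ∨
  (pre.length < 3 ∧ (w = pre ∨ ∃ u, w = u ++ '(' :: pre ∧ w.length ≤ 3))

lemma pv_suffix_drop (l p : List Char) (k : Nat) (hp : p.length ≤ k) :
    p <:+ l.drop (l.length - k) ↔ p <:+ l := by
  constructor
  · intro h; exact h.trans (List.drop_suffix _ _)
  · intro h
    rw [List.suffix_iff_eq_drop] at h ⊢
    rw [List.drop_drop, List.length_drop]
    rw [show l.length - k + (l.length - (l.length - k) - p.length) = l.length - p.length by omega]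
    exact h

lemma pv_drop_eq_iff (w p : List Char) :
    w.drop (w.length - p.length) = p ↔ p <:+ w := by
  constructor
  · intro h; rw [← h]; exact List.drop_suffix _ _
  · intro h; exact (List.suffix_iff_eq_drop.mp h).symm

lemma pv_suffix_through_paren (u pre p : List Char) (hp : '(' ∉ p) :
    (p <:+ u ++ '(' :: pre) ↔ p <:+ pre := by
  constructor
  · intro h
    rcases le_or_gt p.length pre.length with hle | hgt
    · have he := List.suffix_iff_eq_drop.mp h
      rw [List.length_append, List.length_cons, List.drop_append] at he
      rw [List.drop_of_length_le (by omega)] at he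
      simp only [List.nil_append] at he
      rw [show u.length + (pre.length + 1) - p.length - u.length
            = pre.length + 1 - p.length by omega] at he
      have : p = ('(' :: pre).drop (pre.length + 1 - p.length) := he
      rcases Nat.eq_zero_or_pos p.length with h0 | hpos
      · have : p = [] := List.eq_nil_of_length_eq_zero h0
        subst this; exact List.nil_suffix
      · rw [show pre.length + 1 - p.length = 1 + (pre.length - p.length) by omega] at this
        rw [← List.drop_drop] at this
        simp only [List.drop_one, List.tail_cons] at this
        rw [this]
        exact List.drop_suffix _ _
    · exfalso
      have he := List.suffix_iff_eq_drop.mp h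
      rw [List.length_append, List.length_cons] at he
      rw [List.drop_append_of_le_length (by omega)] at he
      apply hp
      rw [he]; simp
  · intro h
    exact h.trans ⟨u ++ ['('], by simp⟩

lemma pv_rel_suffix (w pre p : List Char) (h : pvRel w pre) (hlen : p.length ≤ 3)
    (hp : '(' ∉ p) : (p <:+ w) ↔ p <:+ pre := by
  rcases h with ⟨_, hw⟩ | ⟨_, hw | ⟨u, hw, _⟩⟩
  · rw [hw]; exact pv_suffix_drop pre p 3 hlen
  · rw [hw]
  · rw [hw]; exact pv_suffix_through_paren u pre p hp

lemma pv_rel_eq3 (w pre p : List Char) (h : pvRel w pre) (hlen : p.length = 3)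
    (hp : '(' ∉ p) : (w = p) ↔ p <:+ pre := by
  rcases h with ⟨h3, hw⟩ | ⟨hlt, hw | ⟨u, hw, _⟩⟩
  · have hwl : w.length = 3 := by rw [hw]; simp; omega
    constructor
    · intro he
      exact (pv_rel_suffix w pre p (Or.inl ⟨h3, hw⟩) (by omega) hp).mp (by rw [he])
    · intro hs
      have : p <:+ w := (pv_rel_suffix w pre p (Or.inl ⟨h3, hw⟩) (by omega) hp).mpr hs
      exact (List.IsSuffix.eq_of_length this (by omega)).symm
  · constructor
    · intro he
      exfalso
      have : pre.length = p.length := by rw [← hw, he]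
      omega
    · intro hs
      exfalso
      have := hs.length_le
      omega
  · constructor
    · intro he
      exfalso
      apply hp
      rw [← he, hw]; simp
    · intro hs
      exfalso
      have := hs.length_le
      omega

set_option maxHeartbeats 1000000 in
lemma pv_rel_decision (w pre : List Char) (h : pvRel w pre) :
    (PySem.Chars.endswith w ['\\'] = true ∨
      (PySem.List.slice w (some (-2)) none = ['?', '!'] ∨
       PySem.List.slice w (some (-2)) none = ['?', '=']) ∨
      (w = ['?', '<', '!'] ∨ w = ['?', '<', '='])) ↔ pvBad pre = true := by
  have hsl : PySem.List.slice w (some (-2)) none = w.drop (w.length - 2) :=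
    PySem.List.slice_from_neg_ofNat _ 2 (by omega)
  have e1 : PySem.Chars.endswith w ['\\'] = true ↔ ('\\' :: []) <:+ pre := by
    rw [PySem.Chars.endswith_iff]
    exact pv_rel_suffix w pre _ h (by simp) (by decide)
  have e2 : PySem.List.slice w (some (-2)) none = ['?', '!'] ↔ ['?', '!'] <:+ pre := by
    rw [hsl, show (2 : Nat) = (['?', '!'] : List Char).length by rfl, pv_drop_eq_iff]
    exact pv_rel_suffix w pre _ h (by simp) (by decide)
  have e3 : PySem.List.slice w (some (-2)) none = ['?', '='] ↔ ['?', '='] <:+ pre := by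
    rw [hsl, show (2 : Nat) = (['?', '='] : List Char).length by rfl, pv_drop_eq_iff]
    exact pv_rel_suffix w pre _ h (by simp) (by decide)
  have e4 : w = ['?', '<', '!'] ↔ ['?', '<', '!'] <:+ pre :=
    pv_rel_eq3 w pre _ h (by simp) (by decide)
  have e5 : w = ['?', '<', '='] ↔ ['?', '<', '='] <:+ pre :=
    pv_rel_eq3 w pre _ h (by simp) (by decide)
  rw [e1, e2, e3, e4, e5]
  simp only [pvBad, Bool.or_eq_true, PySem.Chars.endswith_iff]
  tauto

lemma pv_rel_step (w pre : List Char) (ch : Char) (h : pvRel w pre) :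
    pvRel (PySem.List.slice (w ++ [ch]) (some (-3)) none)
      (if ch = '(' then [] else pre ++ [ch]) := by
  have hsl : PySem.List.slice (w ++ [ch]) (some (-3)) none
      = (w ++ [ch]).drop ((w ++ [ch]).length - 3) :=
    PySem.List.slice_from_neg_ofNat _ 3 (by omega)
  have hw3 : w.length ≤ 3 := by
    rcases h with ⟨h3, hw⟩ | ⟨hlt, hw | ⟨u, hw, hl⟩⟩
    · rw [hw]; simp; omega
    · rw [hw]; omega
    · exact hl
  by_cases hc : ch = '('
  · rw [if_pos hc, hsl]
    subst hc
    refine Or.inr ⟨by simp, Or.inr ⟨w.drop ((w ++ ['(']).length - 3), ?_, by simp; omega⟩⟩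
    rw [List.drop_append_of_le_length (by simp)]
  · rw [if_neg hc]
    rcases h with ⟨h3, hw⟩ | ⟨hlt, hw | ⟨u, hw, hl⟩⟩
    · subst hw
      rw [show PySem.List.slice (pre.drop (pre.length - 3) ++ [ch]) (some (-3)) none
            = (pre ++ [ch]).drop ((pre ++ [ch]).length - 3) from pv_window_step pre ch]
      exact Or.inl ⟨by simp; omega, rfl⟩
    · subst hw
      rw [hsl]
      rcases Nat.lt_or_ge (w.length + 1) 3 with hsm | hbg
      · refine Or.inr ⟨by simp; omega, Or.inl ?_⟩
        rw [show (w ++ [ch]).length - 3 = 0 by simp; omega]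
        simp
      · exact Or.inl ⟨by simp; omega, rfl⟩
    · subst hw
      rw [hsl]
      simp only [List.length_append, List.length_cons] at hl
      rcases Nat.lt_or_ge (u.length + (pre.length + 1)) 3 with hsm | hbg
      · refine Or.inr ⟨by simp; omega, Or.inr ⟨u, ?_, by simp; omega⟩⟩
        rw [show ((u ++ '(' :: pre) ++ [ch]).length - 3 = 0 by simp; omega]
        simp
      · have hlen3 : u.length + (pre.length + 1) = 3 := by omega
        rcases Nat.eq_zero_or_pos u.length with hu0 | hup
        · have hu : u = [] := List.eq_nil_of_length_eq_zero hu0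
          subst hu
          refine Or.inl ⟨by simp; omega, ?_⟩
          simp only [List.nil_append, List.cons_append]
          rw [show ('(' :: (pre ++ [ch]) : List Char).length - 3 = 1 by simp; omega]
          rw [show (pre ++ [ch]).length - 3 = 0 by simp; omega]
          simp
        · refine Or.inr ⟨by simp; omega, Or.inr ⟨u.drop 1, ?_, by simp; omega⟩⟩
          rw [show ((u ++ '(' :: pre) ++ [ch]).length - 3 = 1 by simp; omega]
          rw [List.drop_append_of_le_length (by simp; omega),
              List.drop_append_of_le_length (by omega)]
          simp

-- the windowed fold computes pvCnt
lemma pv_win_cnt (s : List Char) : ∀ (w pre : List Char) (c : Int), pvRel w pre →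
    (s.foldl pvStepB (c, w)).1 = c + pvCnt pre s := by
  induction s with
  | nil => intro w pre c h; simp [pvCnt]
  | cons ch r ih =>
    intro w pre c h
    rw [List.foldl_cons]
    have hd := pv_rel_decision w pre h
    have hs := pv_rel_step w pre ch h
    by_cases hc : ch = '('
    · rw [if_pos hc] at hs
      by_cases hb : pvBad pre = true
      · have hstep : pvStepB (c, w) ch = (c, PySem.List.slice (w ++ [ch]) (some (-3)) none) := by
          simp only [pvStepB]
          rw [if_neg]
          rintro ⟨-, hn⟩; exact hn (hd.mpr hb)
        rw [hstep, ih _ [] c hs]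
        simp [pvCnt, hc, hb]
      · have hstep : pvStepB (c, w) ch = (c + 1, PySem.List.slice (w ++ [ch]) (some (-3)) none) := by
          simp only [pvStepB]
          rw [if_pos ⟨hc, fun hbig => hb (hd.mp hbig)⟩]
        rw [hstep, ih _ [] (c + 1) hs]
        simp [pvCnt, hc, hb]
        ring
    · rw [if_neg hc] at hs
      have hstep : pvStepB (c, w) ch = (c, PySem.List.slice (w ++ [ch]) (some (-3)) none) := by
        simp only [pvStepB]
        rw [if_neg]
        rintro ⟨he, -⟩; exact hc he
      rw [hstep, ih _ (pre ++ [ch]) c hs]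
      simp [pvCnt, hc]

-- ===== VERDICT (by name: the statement is the Claim_ definition above) =====
theorem api_count_bracket_py_spec : Claim_equal_api_count_bracket_py := by
  intro txt _
  unfold Spec_api_count_bracket_py api_count_bracket_py api_count_bracket_py_alt
  have hA := pv_loop_eq txt.toList [] 0
  simp only [List.nil_append, List.length_nil, Nat.cast_zero, Nat.zero_add, List.drop_nil] at hA
  have hW : (txt.toList.foldl pvStepB (0, [])).1 = 0 + pvCnt [] txt.toList :=
    pv_win_cnt txt.toList [] [] 0 (Or.inr ⟨by simp, Or.inl rfl⟩)
  have hB : (PySem.List.slice (PySem.Chars.splitOn txt.toList ['(']) none (some (-1))).foldl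
      (fun c p => if pvBad p then c else c + 1) 0 = 0 + pvCnt [] txt.toList := by
    rw [PySem.List.slice_to_neg_one, pv_splitOn_eq]
    have h := pv_split_cnt txt.toList [] 0
    have hid : (pvSplit txt.toList).modifyHead (fun x => ([] : List Char) ++ x)
        = pvSplit txt.toList := by
      cases hsp : pvSplit txt.toList <;> simp
    rw [hid] at h
    simpa using h
  rw [hB]
  rw [← hW, ← hA]
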